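-- pv_equiv track=rewrite | github.com/Fondamenti18/fondamenti-di-programmazione | students/1811110/homework04/program03.py | cond_delnode
-- ===== SOURCE A (Python) =====
-- def cond_delnode(selettore,cond,sel):
--     if ' ' in selettore:
--         for x in selettore:
--             if cond!=1:
--                 if x==' ':
--                     cond=1
--             else:
--                 sel+=x
--     return selettore,cond,sel
-- ===== SOURCE B (Python) =====
-- def cond_delnode(selettore, cond, sel):
--     if ' ' in selettore:
--         if cond != 1:
--             sel += selettore[selettore.index(' ') + 1:]
--             cond = 1
--         else:
--             sel += selettore
--     return selettore, cond, sel
-- ===== Notes on version B (the rewrite author's own statement) =====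
-- stated objective: simpler
-- what changed: Replaces the per-character state-machine loop with a single branch on cond plus one index-and-slice (or whole-string) concatenation.
import Mathlib
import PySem

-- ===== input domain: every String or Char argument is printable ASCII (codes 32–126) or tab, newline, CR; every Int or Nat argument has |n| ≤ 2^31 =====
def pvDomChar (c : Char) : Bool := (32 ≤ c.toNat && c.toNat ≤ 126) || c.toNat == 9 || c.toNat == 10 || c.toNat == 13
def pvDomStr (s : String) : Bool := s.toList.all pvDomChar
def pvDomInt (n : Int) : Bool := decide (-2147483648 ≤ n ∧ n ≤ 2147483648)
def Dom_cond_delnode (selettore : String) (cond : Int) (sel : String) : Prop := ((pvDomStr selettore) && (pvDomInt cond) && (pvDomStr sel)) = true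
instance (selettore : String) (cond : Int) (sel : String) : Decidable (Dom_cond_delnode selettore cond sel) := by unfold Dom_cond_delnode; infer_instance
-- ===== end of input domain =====

-- B replaces A's per-character state-machine loop by one branch on cond and a single
-- index-and-slice (or whole-string) concatenation; objective: simpler.

-- ===== PORT A =====
-- the body of A's for-loop as a fold step over (cond, sel)
def condDelStep (st : Int × List Char) (x : Char) : Int × List Char :=
  if st.1 ≠ 1 then (if x = ' ' then (1, st.2) else st)
  else (st.1, st.2 ++ [x])

def cond_delnode (selettore : String) (cond : Int) (sel : String) : String × Int × String :=
  if selettore.toList.contains ' ' then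
    let r := selettore.toList.foldl condDelStep (cond, sel.toList)
    (selettore, r.1, String.ofList r.2)
  else (selettore, cond, sel)

-- ===== PORT B =====
def cond_delnode_alt (selettore : String) (cond : Int) (sel : String) : String × Int × String :=
  if selettore.toList.contains ' ' then
    if cond ≠ 1 then
      -- sel += selettore[selettore.index(' ')+1:]; cond = 1
      match PySem.List.index? selettore.toList ' ' with
      | some i => (selettore, 1, String.ofList (sel.toList ++ selettore.toList.drop (i + 1)))
      | none => (selettore, cond, sel)  -- unreachable: ' ' is in selettore
    else (selettore, cond, String.ofList (sel.toList ++ selettore.toList))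
  else (selettore, cond, sel)

-- ===== PRECONDITION & SPEC =====
def Spec_cond_delnode (selettore : String) (cond : Int) (sel : String) (out : String × Int × String) : Prop :=
  out = cond_delnode_alt selettore cond sel
instance (selettore : String) (cond : Int) (sel : String) (out : String × Int × String) : Decidable (Spec_cond_delnode selettore cond sel out) := by unfold Spec_cond_delnode; infer_instance

-- ===== CLAIM =====
def Claim_equal_cond_delnode : Prop := ∀ (selettore : String) (cond : Int) (sel : String), Dom_cond_delnode selettore cond sel → Spec_cond_delnode selettore cond sel (cond_delnode selettore cond sel)

-- ===== LEMMAS AND PROOFS =====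
lemma foldl_step_one (l acc : List Char) :
    l.foldl condDelStep (1, acc) = (1, acc ++ l) := by
  induction l generalizing acc with
  | nil => simp
  | cons c t ih => simp [condDelStep, ih]

lemma foldl_step_pre (c0 : Int) (h : c0 ≠ 1) (pre suf acc : List Char) (hpre : ' ' ∉ pre) :
    (pre ++ ' ' :: suf).foldl condDelStep (c0, acc) = (1, acc ++ suf) := by
  induction pre with
  | nil => simp [condDelStep, h, foldl_step_one]
  | cons c t ih =>
    have hc : c ≠ ' ' := fun hc => hpre (hc ▸ List.mem_cons_self)
    have ht : ' ' ∉ t := fun hm => hpre (List.mem_cons_of_mem _ hm)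
    simp only [List.cons_append, List.foldl_cons, condDelStep, if_pos h, if_neg hc]
    exact ih ht

-- ===== VERDICT =====
theorem cond_delnode_spec : Claim_equal_cond_delnode := by
  intro selettore cond sel _
  unfold Spec_cond_delnode cond_delnode cond_delnode_alt
  by_cases hmem : selettore.toList.contains ' '
  · simp only [hmem, if_true]
    by_cases hc : cond = 1
    · subst hc
      simp [foldl_step_one]
    · simp only [if_pos (show cond ≠ 1 from hc)]
      have hmem' : ' ' ∈ selettore.toList := by simpa using hmem
      have hsome : (PySem.List.index? selettore.toList ' ').isSome := by
        rw [PySem.List.index?_isSome_iff]; exact hmem'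
      obtain ⟨k, hk⟩ := Option.isSome_iff_exists.mp hsome
      rw [hk]
      obtain ⟨pre, suf, hdecomp, hlen, hnot⟩ := (PySem.List.index?_eq_some_iff _ _ _).mp hk
      rw [hdecomp, foldl_step_pre cond hc pre suf sel.toList hnot]
      have hdrop : (pre ++ ' ' :: suf).drop (k + 1) = suf := by
        subst hlen
        rw [show pre ++ ' ' :: suf = (pre ++ [' ']) ++ suf by simp,
           show pre.length + 1 = (pre ++ [' ']).length by simp, List.drop_left]
      simp [hdrop]
  · simp at hmem
    simp [hmem]
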